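-- pv_equiv track=rewrite | github.com/syqwq-OMG/CS61A | project/cats/cats.py | final_diff
-- ===== SOURCE A (Python) =====
-- def final_diff(typed, source, limit):
--     """A diff function that takes in a string TYPED, a string SOURCE, and a number LIMIT.
--     If you implement this function, it will be used."""
--     # assert False, "Remove this line to use your final_diff function."
--     # python3 score.py > correction.txt &
--     INF = 0x7FFFFFFFFF
--     if (min_len := min(len(typed), len(source))) == 0:
--         max_len = max(len(typed), len(source))
--         return max_len if max_len <= limit else INF
--
--     if limit < 0:
--         return INF
--
--     if typed == source:
--         return 0
--
--     if typed[0] == source[0]: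
--         return final_diff(typed[1:], source[1:], limit)
--
--     if min_len > 1 and (typed[0], typed[1]) == (source[1], source[0]):
--         swap = final_diff(typed[2:], source[2:], limit - 1)
--     else:
--         swap = INF
--     add = final_diff(source[0] + typed, source, limit - 1)
--     remove = final_diff(typed[1:], source, limit - 1)
--     substitute = final_diff(source[0] + typed[1:], source, limit - 1)
--
--     return min(swap, add, remove, substitute) + 1
-- ===== SOURCE B (Python) =====
-- def final_diff(typed, source, limit):
--     """Memoized DP over suffix indices (i, j) and remaining limit l, instead of
--     the naive branching recursion over string slices; returns the identical
--     values (including the over-limit INF+k values the original produces)."""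
--     INF = 0x7FFFFFFFFF
--     n, m = len(typed), len(source)
--     memo = {}
--
--     def solve(i, j, l):
--         if i >= n or j >= m:
--             mx = max(n - i, m - j)
--             return mx if mx <= l else INF
--         if l < 0:
--             return INF
--         key = (i, j, l)
--         if key in memo:
--             return memo[key]
--         if typed[i] == source[j]:
--             res = solve(i + 1, j + 1, l)
--         else:
--             if n - i > 1 and m - j > 1 and typed[i] == source[j + 1] and typed[i + 1] == source[j]:
--                 swap = solve(i + 2, j + 2, l - 1)
--             else:
--                 swap = INF
--             add = solve(i, j + 1, l - 1)
--             remove = solve(i + 1, j, l - 1)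
--             substitute = solve(i + 1, j + 1, l - 1)
--             res = min(swap, add, remove, substitute) + 1
--         memo[key] = res
--         return res
--
--     return solve(0, 0, limit)
-- ===== Notes on version B (the rewrite author's own statement) =====
-- stated objective: alternative
-- what changed: Replaces A's naive branching recursion over string slices with a memoized dynamic program over suffix indices (i, j) and the remaining limit, reproducing A's exact values including the over-limit INF+k results.
import Mathlib
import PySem

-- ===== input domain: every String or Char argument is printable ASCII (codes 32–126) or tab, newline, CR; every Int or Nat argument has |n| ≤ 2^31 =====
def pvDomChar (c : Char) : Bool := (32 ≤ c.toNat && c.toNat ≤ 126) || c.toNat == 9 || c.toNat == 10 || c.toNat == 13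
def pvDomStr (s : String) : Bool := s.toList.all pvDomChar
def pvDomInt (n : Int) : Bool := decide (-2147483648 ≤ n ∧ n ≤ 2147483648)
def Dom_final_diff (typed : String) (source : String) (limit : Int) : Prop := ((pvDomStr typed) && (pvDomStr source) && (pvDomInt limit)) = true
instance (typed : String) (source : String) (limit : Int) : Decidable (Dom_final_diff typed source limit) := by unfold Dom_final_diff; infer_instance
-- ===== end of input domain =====

-- B replaces A's naive branching recursion over string slices by a memoized DP over
-- suffix indices (i, j) and the remaining limit, returning identical values
-- (including A's over-limit INF+k values).

-- ===== PORT A =====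
-- literal port of A's recursion over the character lists of the strings (slices = drop/take)
def finalDiffA (t s : List Char) (limit : Int) : Int :=
  if Nat.min t.length s.length = 0 then
    if (Nat.max t.length s.length : Int) ≤ limit then (Nat.max t.length s.length : Int)
    else (0x7FFFFFFFFF : Int)
  else if limit < 0 then (0x7FFFFFFFFF : Int)
  else if t = s then 0
  else if t[0]? = s[0]? then finalDiffA (t.drop 1) (s.drop 1) limit
  else
    let swap : Int :=
      if 1 < Nat.min t.length s.length ∧ (t[0]?, t[1]?) = (s[1]?, s[0]?) then
        finalDiffA (t.drop 2) (s.drop 2) (limit - 1)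
      else (0x7FFFFFFFFF : Int)
    let add := finalDiffA (s.take 1 ++ t) s (limit - 1)
    let remove := finalDiffA (t.drop 1) s (limit - 1)
    let substitute := finalDiffA (s.take 1 ++ t.drop 1) s (limit - 1)
    min (min (min swap add) remove) substitute + 1
termination_by ((limit + 1).toNat, t.length + s.length)
decreasing_by
  all_goals simp only [List.length_drop, List.length_append, List.length_take]
  all_goals first
    | (apply Prod.Lex.right; simp only [Nat.min_def] at *; split_ifs at * <;> omega)
    | (apply Prod.Lex.left; omega)

def final_diff (typed : String) (source : String) (limit : Int) : Int :=
  finalDiffA typed.toList source.toList limit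

-- ===== PORT B =====
-- literal port of Source B's `solve`: memo is threaded explicitly (Python closes over a dict)
def solveB (t s : List Char) (i j : Nat) (l : Int)
    (memo : PySem.Dict (Nat × Nat × Int) Int) : Int × PySem.Dict (Nat × Nat × Int) Int :=
  if t.length ≤ i ∨ s.length ≤ j then
    let mx : Int := max ((t.length : Int) - i) ((s.length : Int) - j)
    (if mx ≤ l then mx else (0x7FFFFFFFFF : Int), memo)
  else if l < 0 then ((0x7FFFFFFFFF : Int), memo)
  else
    match memo.get? (i, j, l) with
    | some v => (v, memo)
    | none =>
      if t[i]? = s[j]? then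
        let r := solveB t s (i + 1) (j + 1) l memo
        (r.1, r.2.insert (i, j, l) r.1)
      else
        let sw : Int × PySem.Dict (Nat × Nat × Int) Int :=
          if 1 < (t.length : Int) - i ∧ 1 < (s.length : Int) - j ∧
             t[i]? = s[j + 1]? ∧ t[i + 1]? = s[j]? then
            solveB t s (i + 2) (j + 2) (l - 1) memo
          else ((0x7FFFFFFFFF : Int), memo)
        let ad := solveB t s i (j + 1) (l - 1) sw.2
        let rm := solveB t s (i + 1) j (l - 1) ad.2
        let su := solveB t s (i + 1) (j + 1) (l - 1) rm.2
        let res := min (min (min sw.1 ad.1) rm.1) su.1 + 1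
        (res, su.2.insert (i, j, l) res)
termination_by ((l + 1).toNat, (t.length - i) + (s.length - j))
decreasing_by
  all_goals first
    | (apply Prod.Lex.right; omega)
    | (apply Prod.Lex.left; omega)

def final_diff_alt (typed : String) (source : String) (limit : Int) : Int :=
  (solveB typed.toList source.toList 0 0 limit PySem.Dict.empty).1

-- ===== PRECONDITION & SPEC =====
def Spec_final_diff (typed : String) (source : String) (limit : Int) (out : Int) : Prop := out = final_diff_alt typed source limit
instance (typed : String) (source : String) (limit : Int) (out : Int) : Decidable (Spec_final_diff typed source limit out) := by unfold Spec_final_diff; infer_instance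

-- ===== CLAIM (what is proved, stated in full; the proofs are below) =====
def Claim_equal_final_diff : Prop := ∀ (typed : String) (source : String) (limit : Int), Dom_final_diff typed source limit → Spec_final_diff typed source limit (final_diff typed source limit)

-- ===== LEMMAS AND PROOFS =====

-- ghost: the uncached value of B's recursion (no memo, conditions inlined)
def pureR (t s : List Char) (i j : Nat) (l : Int) : Int :=
  if t.length ≤ i ∨ s.length ≤ j then
    if max ((t.length : Int) - i) ((s.length : Int) - j) ≤ l then
      max ((t.length : Int) - i) ((s.length : Int) - j)
    else (0x7FFFFFFFFF : Int)
  else if l < 0 then (0x7FFFFFFFFF : Int)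
  else if t[i]? = s[j]? then pureR t s (i + 1) (j + 1) l
  else
    min (min (min
      (if 1 < (t.length : Int) - i ∧ 1 < (s.length : Int) - j ∧
          t[i]? = s[j + 1]? ∧ t[i + 1]? = s[j]? then
        pureR t s (i + 2) (j + 2) (l - 1)
      else (0x7FFFFFFFFF : Int))
      (pureR t s i (j + 1) (l - 1)))
      (pureR t s (i + 1) j (l - 1)))
      (pureR t s (i + 1) (j + 1) (l - 1)) + 1
termination_by ((l + 1).toNat, (t.length - i) + (s.length - j))
decreasing_by
  all_goals first
    | (apply Prod.Lex.right; omega)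
    | (apply Prod.Lex.left; omega)

lemma pureR_neg (t s : List Char) (i j : Nat) (l : Int) (hi : i ≤ t.length)
    (hj : j ≤ s.length) (hl : l < 0) : pureR t s i j l = (0x7FFFFFFFFF : Int) := by
  rw [pureR]
  split_ifs with h1 h2
  · omega
  · rfl
  · rfl

lemma pureR_eq_suffix (t s : List Char) : ∀ i j l, i ≤ t.length → j ≤ s.length →
    t.drop i = s.drop j → 0 ≤ l → pureR t s i j l = 0 := by
  intro i j l
  induction i, j, l using pureR.induct t s with
  | case1 i j l hbase hle =>
    intro hi hj h hl
    have hlen : t.length - i = s.length - j := by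
      have := congrArg List.length h; simpa using this
    rw [pureR, if_pos hbase, if_pos hle]
    omega
  | case2 i j l hbase hgt =>
    intro hi hj h hl
    exfalso
    have hlen : t.length - i = s.length - j := by
      have := congrArg List.length h; simpa using this
    apply hgt
    omega
  | case3 i j l hbase hneg =>
    intro _ _ _ hl; omega
  | case4 i j l hbase hneg hhead ih =>
    intro hi hj h hl
    rw [pureR, if_neg hbase, if_neg hneg, if_pos hhead]
    refine ih (by omega) (by omega) ?_ hl
    have := congrArg List.tail h
    simpa [List.tail_drop] using this
  | case5 i j l hbase hneg hhead ih1 ih2 ih3 ih4 =>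
    intro hi hj h hl
    exfalso
    apply hhead
    have h0 := congrArg (fun u => u[0]?) h
    simp only [List.getElem?_drop, Nat.add_zero] at h0
    exact h0

-- helper: A unfolded once on (s[j] :: t.drop i, s.drop j), as it appears in A's
-- add/substitute recursive calls
lemma finalDiffA_cons (t s : List Char) (i j : Nat) (l : Int) (hi : i ≤ t.length)
    (hj : j < s.length)
    (hrec : finalDiffA (t.drop i) (s.drop (j + 1)) l = pureR t s i (j + 1) l) :
    finalDiffA (s[j] :: t.drop i) (s.drop j) l = pureR t s i (j + 1) l := by
  rw [finalDiffA]
  have hnz : ¬ Nat.min (s[j] :: t.drop i).length (s.drop j).length = 0 := by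
    simp only [List.length_cons, List.length_drop, Nat.min_def]
    split_ifs
    · exact not_false
    · omega
  rw [if_neg hnz]
  by_cases hl : l < 0
  · rw [if_pos hl, pureR_neg t s i (j + 1) l (by omega) (by omega) hl]
  · rw [if_neg hl]
    have hdropj : s.drop j = s[j] :: s.drop (j + 1) := List.drop_eq_getElem_cons hj
    by_cases heq : (s[j] :: t.drop i) = s.drop j
    · rw [if_pos heq]
      rw [hdropj] at heq
      have hts : t.drop i = s.drop (j + 1) := by injection heq
      rw [pureR_eq_suffix t s i (j + 1) l (by omega) (by omega) hts (by omega)]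
    · rw [if_neg heq]
      have hh : (s[j] :: t.drop i)[0]? = (s.drop j)[0]? := by
        rw [hdropj]; rfl
      rw [if_pos hh]
      have e0 : (s[j] :: t.drop i).drop 1 = t.drop i := rfl
      have e2 : (s.drop j).drop 1 = s.drop (j + 1) := by
        rw [List.drop_drop, Nat.add_comm]
      rw [e0, e2]
      exact hrec

lemma finalDiffA_eq_pureR (t s : List Char) : ∀ i j l, i ≤ t.length → j ≤ s.length →
    finalDiffA (t.drop i) (s.drop j) l = pureR t s i j l := by
  intro i j l
  induction i, j, l using pureR.induct t s with
  | case1 i j l hbase hle =>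
    intro hi hj
    rw [finalDiffA, pureR]
    have hz : Nat.min (t.drop i).length (s.drop j).length = 0 := by
      simp only [List.length_drop, Nat.min_def]; split_ifs <;> omega
    have hmx : ((Nat.max (t.drop i).length (s.drop j).length : Nat) : Int)
        = max ((t.length : Int) - i) ((s.length : Int) - j) := by
      simp only [List.length_drop, max_def]
      split_ifs <;> omega
    rw [if_pos hz, if_pos hbase, hmx, if_pos hle]
  | case2 i j l hbase hgt =>
    intro hi hj
    rw [finalDiffA, pureR]
    have hz : Nat.min (t.drop i).length (s.drop j).length = 0 := by
      simp only [List.length_drop, Nat.min_def]; split_ifs <;> omega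
    have hmx : ((Nat.max (t.drop i).length (s.drop j).length : Nat) : Int)
        = max ((t.length : Int) - i) ((s.length : Int) - j) := by
      simp only [List.length_drop, max_def]
      split_ifs <;> omega
    rw [if_pos hz, if_pos hbase, hmx, if_neg hgt]
  | case3 i j l hbase hneg =>
    intro hi hj
    rw [finalDiffA, pureR]
    have hnz : ¬ Nat.min (t.drop i).length (s.drop j).length = 0 := by
      simp only [List.length_drop, Nat.min_def]; split_ifs <;> omega
    rw [if_neg hnz, if_pos hneg, if_neg hbase, if_pos hneg]
  | case4 i j l hbase hneg hhead ih =>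
    intro hi hj
    rw [finalDiffA]
    have hnz : ¬ Nat.min (t.drop i).length (s.drop j).length = 0 := by
      simp only [List.length_drop, Nat.min_def]; split_ifs <;> omega
    rw [if_neg hnz, if_neg hneg]
    by_cases heq : t.drop i = s.drop j
    · rw [if_pos heq,
        pureR_eq_suffix t s i j l (by omega) (by omega) heq (by omega)]
    · rw [if_neg heq]
      have hh : (t.drop i)[0]? = (s.drop j)[0]? := by
        rw [List.getElem?_drop, List.getElem?_drop, Nat.add_zero, Nat.add_zero]
        exact hhead
      rw [if_pos hh]
      rw [pureR, if_neg hbase, if_neg hneg, if_pos hhead]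
      have e1 : (t.drop i).drop 1 = t.drop (i + 1) := by
        rw [List.drop_drop, Nat.add_comm]
      have e2 : (s.drop j).drop 1 = s.drop (j + 1) := by
        rw [List.drop_drop, Nat.add_comm]
      rw [e1, e2]
      exact ih (by omega) (by omega)
  | case5 i j l hbase hneg hhead ih1 ih2 ih3 ih4 =>
    intro hi hj
    have hilt : i < t.length := by omega
    have hjlt : j < s.length := by omega
    rw [finalDiffA]
    have hnz : ¬ Nat.min (t.drop i).length (s.drop j).length = 0 := by
      simp only [List.length_drop, Nat.min_def]; split_ifs <;> omega
    rw [if_neg hnz, if_neg hneg]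
    have hget0t : (t.drop i)[0]? = t[i]? := by
      rw [List.getElem?_drop, Nat.add_zero]
    have hget0s : (s.drop j)[0]? = s[j]? := by
      rw [List.getElem?_drop, Nat.add_zero]
    have hget1t : (t.drop i)[1]? = t[i + 1]? := by rw [List.getElem?_drop]
    have hget1s : (s.drop j)[1]? = s[j + 1]? := by rw [List.getElem?_drop]
    have heq : ¬ t.drop i = s.drop j := by
      intro h
      apply hhead
      have h0 := congrArg (fun u => u[0]?) h
      simp only [List.getElem?_drop, Nat.add_zero] at h0
      exact h0
    rw [if_neg heq]
    have hh : ¬ (t.drop i)[0]? = (s.drop j)[0]? := by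
      rw [hget0t, hget0s]; exact hhead
    rw [if_neg hh]
    rw [pureR, if_neg hbase, if_neg hneg, if_neg hhead]
    have hdropj : s.drop j = s[j] :: s.drop (j + 1) := List.drop_eq_getElem_cons hjlt
    have htake : (s.drop j).take 1 = [s[j]] := by rw [hdropj]; rfl
    have e1 : (t.drop i).drop 1 = t.drop (i + 1) := by
      rw [List.drop_drop, Nat.add_comm]
    have hswap :
        (if 1 < Nat.min (t.drop i).length (s.drop j).length ∧
            ((t.drop i)[0]?, (t.drop i)[1]?) = ((s.drop j)[1]?, (s.drop j)[0]?) then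
          finalDiffA ((t.drop i).drop 2) ((s.drop j).drop 2) (l - 1)
        else (0x7FFFFFFFFF : Int)) =
        (if 1 < (t.length : Int) - i ∧ 1 < (s.length : Int) - j ∧
            t[i]? = s[j + 1]? ∧ t[i + 1]? = s[j]? then
          pureR t s (i + 2) (j + 2) (l - 1)
        else (0x7FFFFFFFFF : Int)) := by
      have hcond : (1 < Nat.min (t.drop i).length (s.drop j).length ∧
          ((t.drop i)[0]?, (t.drop i)[1]?) = ((s.drop j)[1]?, (s.drop j)[0]?)) ↔
          (1 < (t.length : Int) - i ∧ 1 < (s.length : Int) - j ∧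
            t[i]? = s[j + 1]? ∧ t[i + 1]? = s[j]?) := by
        rw [hget0t, hget0s, hget1t, hget1s, Prod.mk.injEq]
        simp only [List.length_drop, Nat.min_def]
        constructor
        · rintro ⟨h1, h2, h3⟩
          exact ⟨by split_ifs at h1 <;> omega, by split_ifs at h1 <;> omega, h2, h3⟩
        · rintro ⟨h1, h2, h3, h4⟩
          exact ⟨by split_ifs <;> omega, h3, h4⟩
      by_cases hc : 1 < (t.length : Int) - i ∧ 1 < (s.length : Int) - j ∧
          t[i]? = s[j + 1]? ∧ t[i + 1]? = s[j]?
      · rw [if_pos (hcond.mpr hc), if_pos hc]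
        have et : (t.drop i).drop 2 = t.drop (i + 2) := by
          rw [List.drop_drop, Nat.add_comm]
        have es : (s.drop j).drop 2 = s.drop (j + 2) := by
          rw [List.drop_drop, Nat.add_comm]
        rw [et, es]
        exact ih1 (by omega) (by omega)
      · rw [if_neg (fun hx => hc (hcond.mp hx)), if_neg hc]
    have hadd : finalDiffA ((s.drop j).take 1 ++ t.drop i) (s.drop j) (l - 1)
        = pureR t s i (j + 1) (l - 1) := by
      rw [htake, List.singleton_append]
      exact finalDiffA_cons t s i j (l - 1) (by omega) hjlt (ih2 (by omega) (by omega))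
    have hrem : finalDiffA ((t.drop i).drop 1) (s.drop j) (l - 1)
        = pureR t s (i + 1) j (l - 1) := by
      rw [e1]; exact ih3 (by omega) (by omega)
    have hsub : finalDiffA ((s.drop j).take 1 ++ (t.drop i).drop 1) (s.drop j) (l - 1)
        = pureR t s (i + 1) (j + 1) (l - 1) := by
      rw [htake, e1, List.singleton_append]
      exact finalDiffA_cons t s (i + 1) j (l - 1) (by omega) hjlt (ih4 (by omega) (by omega))
    simp only [hswap, hadd, hrem, hsub]

-- memo invariant: every cached value is the uncached value at its key
def MemoOK (t s : List Char) (memo : PySem.Dict (Nat × Nat × Int) Int) : Prop :=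
  ∀ i j l v, memo.get? (i, j, l) = some v → v = pureR t s i j l

lemma memoOK_insert (t s : List Char) (memo : PySem.Dict (Nat × Nat × Int) Int)
    (i j : Nat) (l v : Int) (h : MemoOK t s memo) (hv : v = pureR t s i j l) :
    MemoOK t s (memo.insert (i, j, l) v) := by
  intro i' j' l' w hw
  rw [PySem.Dict.get?_insert] at hw
  split_ifs at hw with hk
  · obtain ⟨h1, h2, h3⟩ : i' = i ∧ j' = j ∧ l' = l := by
      simpa [Prod.ext_iff] using hk
    subst h1; subst h2; subst h3
    cases hw
    exact hv
  · exact h _ _ _ _ hw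

lemma solveB_correct (t s : List Char) : ∀ i j l memo, MemoOK t s memo →
    (solveB t s i j l memo).1 = pureR t s i j l ∧ MemoOK t s (solveB t s i j l memo).2 := by
  intro i j l memo
  induction i, j, l, memo using solveB.induct t s with
  | case1 i j l memo hbase =>
    intro hok
    rw [solveB, if_pos hbase, pureR, if_pos hbase]
    exact ⟨rfl, hok⟩
  | case2 i j l memo hbase hneg =>
    intro hok
    rw [solveB, if_neg hbase, if_pos hneg, pureR, if_neg hbase, if_pos hneg]
    exact ⟨rfl, hok⟩
  | case3 i j l memo hbase hneg v hget =>
    intro hok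
    rw [solveB, if_neg hbase, if_neg hneg, hget]
    exact ⟨hok _ _ _ _ hget, hok⟩
  | case4 i j l memo hbase hneg hget hhead ih =>
    intro hok
    obtain ⟨ih1, ih2⟩ := ih hok
    rw [solveB, if_neg hbase, if_neg hneg, hget, if_pos hhead]
    have hval : (solveB t s (i + 1) (j + 1) l memo).1 = pureR t s i j l := by
      rw [ih1]
      conv_rhs => rw [pureR]
      rw [if_neg hbase, if_neg hneg, if_pos hhead]
    exact ⟨hval, memoOK_insert t s _ i j l _ ih2 hval⟩
  | case5 i j l memo hbase hneg hget hhead sw ad rm ihsw ihad ihad2 ihrm ihrm2 ihsu =>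
    intro hok
    rw [solveB, if_neg hbase, if_neg hneg, hget, if_neg hhead]
    clear ihad2 ihrm2
    by_cases hg : 1 < (t.length : Int) - i ∧ 1 < (s.length : Int) - j ∧
        t[i]? = s[j + 1]? ∧ t[i + 1]? = s[j]?
    case pos =>
      obtain ⟨hswv, hswm⟩ := ihsw hok
      have hsw1 : (if 1 < (t.length : Int) - i ∧ 1 < (s.length : Int) - j ∧
            t[i]? = s[j + 1]? ∧ t[i + 1]? = s[j]? then
            solveB t s (i + 2) (j + 2) (l - 1) memo
          else ((0x7FFFFFFFFF : Int), memo)).1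
          = (if 1 < (t.length : Int) - i ∧ 1 < (s.length : Int) - j ∧
              t[i]? = s[j + 1]? ∧ t[i + 1]? = s[j]? then
              pureR t s (i + 2) (j + 2) (l - 1)
            else (0x7FFFFFFFFF : Int)) := by
        rw [if_pos hg, if_pos hg, hswv]
      have hsw2 : MemoOK t s (if 1 < (t.length : Int) - i ∧ 1 < (s.length : Int) - j ∧
            t[i]? = s[j + 1]? ∧ t[i + 1]? = s[j]? then
            solveB t s (i + 2) (j + 2) (l - 1) memo
          else ((0x7FFFFFFFFF : Int), memo)).2 := by
        rw [if_pos hg]; exact hswm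
      obtain ⟨had1, had2⟩ := ihad hsw2
      obtain ⟨hrm1, hrm2⟩ := ihrm had2
      obtain ⟨hsu1, hsu2⟩ := ihsu hrm2
      have hval : min (min (min
            (if 1 < (t.length : Int) - i ∧ 1 < (s.length : Int) - j ∧
                t[i]? = s[j + 1]? ∧ t[i + 1]? = s[j]? then
              solveB t s (i + 2) (j + 2) (l - 1) memo
            else ((0x7FFFFFFFFF : Int), memo)).1 ad.1) rm.1) (solveB t s (i + 1) (j + 1) (l - 1) rm.2).1 + 1
          = pureR t s i j l := by
        rw [hsw1, had1, hrm1, hsu1]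
        conv_rhs => rw [pureR]
        rw [if_neg hbase, if_neg hneg, if_neg hhead]
      exact ⟨hval, memoOK_insert t s _ i j l _ hsu2 hval⟩
    case neg =>
      have hsw1 : (if 1 < (t.length : Int) - i ∧ 1 < (s.length : Int) - j ∧
            t[i]? = s[j + 1]? ∧ t[i + 1]? = s[j]? then
            solveB t s (i + 2) (j + 2) (l - 1) memo
          else ((0x7FFFFFFFFF : Int), memo)).1
          = (if 1 < (t.length : Int) - i ∧ 1 < (s.length : Int) - j ∧
              t[i]? = s[j + 1]? ∧ t[i + 1]? = s[j]? then
              pureR t s (i + 2) (j + 2) (l - 1)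
            else (0x7FFFFFFFFF : Int)) := by
        rw [if_neg hg, if_neg hg]
      have hsw2 : MemoOK t s (if 1 < (t.length : Int) - i ∧ 1 < (s.length : Int) - j ∧
            t[i]? = s[j + 1]? ∧ t[i + 1]? = s[j]? then
            solveB t s (i + 2) (j + 2) (l - 1) memo
          else ((0x7FFFFFFFFF : Int), memo)).2 := by
        rw [if_neg hg]; exact hok
      obtain ⟨had1, had2⟩ := ihad hsw2
      obtain ⟨hrm1, hrm2⟩ := ihrm had2
      obtain ⟨hsu1, hsu2⟩ := ihsu hrm2
      have hval : min (min (min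
            (if 1 < (t.length : Int) - i ∧ 1 < (s.length : Int) - j ∧
                t[i]? = s[j + 1]? ∧ t[i + 1]? = s[j]? then
              solveB t s (i + 2) (j + 2) (l - 1) memo
            else ((0x7FFFFFFFFF : Int), memo)).1 ad.1) rm.1) (solveB t s (i + 1) (j + 1) (l - 1) rm.2).1 + 1
          = pureR t s i j l := by
        rw [hsw1, had1, hrm1, hsu1]
        conv_rhs => rw [pureR]
        rw [if_neg hbase, if_neg hneg, if_neg hhead]
      exact ⟨hval, memoOK_insert t s _ i j l _ hsu2 hval⟩

-- ===== VERDICT (by name: the statement is the Claim_ definition above) =====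
theorem final_diff_spec : Claim_equal_final_diff := by
  intro typed source limit _
  unfold Spec_final_diff final_diff final_diff_alt
  have h1 := finalDiffA_eq_pureR typed.toList source.toList 0 0 limit (by omega) (by omega)
  have h2 := solveB_correct typed.toList source.toList 0 0 limit PySem.Dict.empty
    (by intro i j l v h; simp [PySem.Dict.get?_empty] at h)
  simp only [List.drop_zero] at h1
  rw [h1, (h2).1]
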